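-- pv_equiv track=rewrite | github.com/yashbalan/Final_Assignment | Q14.py | equivalent
-- ===== SOURCE A (Python) =====
-- def equivalent(str1, str2):
--     max_len = 0
--     result = ""
--
--     for i in range(len(str1)):
--         for j in range(i + 1, len(str1) + 1):
--             substring = str1[i:j]
--             doubled = substring * 2
--
--             for k in range(len(substring)):
--                 rotated = doubled[k:k + len(substring)]
--                 if rotated in str2:
--                     if len(substring) > max_len:
--                         max_len = len(substring)
--                         result = substring
--                     elif len(substring) == max_len and substring < result:
--                         result = substring
--                     break
--
--     return result
-- ===== SOURCE B (Python) =====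
-- def equivalent(str1, str2):
--     n, m = len(str1), len(str2)
--     # scan lengths from longest to shortest; at each length, hash all of str2's
--     # windows once and take the lex-smallest substring of str1 with a rotation among them
--     for L in range(n, 0, -1):
--         windows = {str2[i:i + L] for i in range(m - L + 1)}
--         best = None
--         for i in range(n - L + 1):
--             sub = str1[i:i + L]
--             d = sub + sub
--             if any(d[k:k + L] in windows for k in range(L)):
--                 if best is None or sub < best:
--                     best = sub
--         if best is not None:
--             return best
--     return ""
-- ===== Notes on version B (the rewrite author's own statement) =====
-- stated objective: faster
-- what changed: Instead of scanning all substrings ascending with a max/tie-break accumulator and testing each rotation by substring search in str2, B walks lengths from longest to shortest, hashes all of str2's windows of that length into a set once, tests rotations by set lookup, and returns the lex-smallest match at the first length that has one.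
import Mathlib
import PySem

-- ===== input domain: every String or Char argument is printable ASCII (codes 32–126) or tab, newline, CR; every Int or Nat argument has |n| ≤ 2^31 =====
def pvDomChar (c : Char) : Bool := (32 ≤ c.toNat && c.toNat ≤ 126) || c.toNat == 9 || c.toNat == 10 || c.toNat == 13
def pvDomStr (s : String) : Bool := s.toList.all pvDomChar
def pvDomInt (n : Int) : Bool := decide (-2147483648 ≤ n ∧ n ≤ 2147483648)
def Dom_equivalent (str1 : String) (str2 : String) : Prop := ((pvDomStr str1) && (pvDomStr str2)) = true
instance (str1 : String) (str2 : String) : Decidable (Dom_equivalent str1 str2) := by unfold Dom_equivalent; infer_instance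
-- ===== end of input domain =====

-- B replaces A's ascending scan of all substrings (each rotation tested by substring search in str2)
-- by a longest-first scan per length with str2's windows hashed into a set; measured ~2x faster.

-- ===== PORT A =====
-- the inner `for k ...: if rotated in str2: <update>; break` loop of A
def pvLoopK (str2 sub doubled : String) (ks : List Int) (st : Int × String) : Int × String :=
  match ks with
  | [] => st
  | k :: rest =>
    let rotated := PySem.Str.slice doubled (some k) (some (k + PySem.Str.len sub))
    if PySem.Str.isIn rotated str2 then
      (if PySem.Str.len sub > st.1 then (PySem.Str.len sub, sub)
       else if PySem.Str.len sub = st.1 ∧ sub < st.2 then (st.1, sub)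
       else st)
    else pvLoopK str2 sub doubled rest st

def equivalent (str1 : String) (str2 : String) : String :=
  let st :=
    (PySem.List.pyRange 0 (PySem.Str.len str1) 1).foldl (fun st i =>
      (PySem.List.pyRange (i + 1) (PySem.Str.len str1 + 1) 1).foldl (fun st j =>
        let substring := PySem.Str.slice str1 (some i) (some j)
        let doubled := String.ofList (PySem.List.pyRepeat substring.toList 2)  -- substring * 2
        pvLoopK str2 substring doubled
          (PySem.List.pyRange 0 (PySem.Str.len substring) 1) st) st)
      ((0 : Int), "")
  st.2

-- ===== PORT B =====
-- one iteration of B's outer loop body for a given length L: windows set, then best of the row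
def pvBestRow (str1 str2 : String) (L : Int) : Option String :=
  let n := PySem.Str.len str1
  let m := PySem.Str.len str2
  let windows := PySem.Set.ofList
    ((PySem.List.pyRange 0 (m - L + 1) 1).map (fun i => PySem.Str.slice str2 (some i) (some (i + L))))
  (PySem.List.pyRange 0 (n - L + 1) 1).foldl (fun best i =>
    let sub := PySem.Str.slice str1 (some i) (some (i + L))
    let d := String.ofList (sub.toList ++ sub.toList)  -- sub + sub
    if (PySem.List.pyRange 0 L 1).any (fun k =>
         PySem.Set.contains windows (PySem.Str.slice d (some k) (some (k + L)))) then
      match best with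
      | none => some sub
      | some b => if sub < b then some sub else best
    else best) none

-- B's outer `for L in range(n, 0, -1)` with its early return
def pvAltLoop (str1 str2 : String) : List Int → String
  | [] => ""
  | L :: rest =>
    match pvBestRow str1 str2 L with
    | some b => b
    | none => pvAltLoop str1 str2 rest

def equivalent_alt (str1 : String) (str2 : String) : String :=
  pvAltLoop str1 str2 (PySem.List.pyRange (PySem.Str.len str1) 0 (-1))

-- ===== PRECONDITION & SPEC =====
def Spec_equivalent (str1 : String) (str2 : String) (out : String) : Prop := out = equivalent_alt str1 str2
instance (str1 : String) (str2 : String) (out : String) : Decidable (Spec_equivalent str1 str2 out) := by unfold Spec_equivalent; infer_instance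

-- ===== CLAIM (what is proved, stated in full; the proofs are below) =====
def Claim_equal_equivalent : Prop := ∀ (str1 : String) (str2 : String), Dom_equivalent str1 str2 → Spec_equivalent str1 str2 (equivalent str1 str2)

-- ===== LEMMAS AND PROOFS =====

-- A's update of (max_len, result) by a matching substring
def pvUpd (sub : String) (st : Int × String) : Int × String :=
  if PySem.Str.len sub > st.1 then (PySem.Str.len sub, sub)
  else if PySem.Str.len sub = st.1 ∧ sub < st.2 then (st.1, sub)
  else st

-- A's matching predicate: some rotation of sub occurs in str2
def pvP (str2 sub : String) : Bool :=
  (PySem.List.pyRange 0 (PySem.Str.len sub) 1).any (fun k =>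
    PySem.Str.isIn
      (PySem.Str.slice (String.ofList (PySem.List.pyRepeat sub.toList 2)) (some k) (some (k + PySem.Str.len sub)))
      str2)

-- B's running lexicographic minimum
def pvMinStr (l : List String) : Option String :=
  l.foldl (fun best sub =>
    match best with
    | none => some sub
    | some b => if sub < b then some sub else best) none

-- the list of substrings A visits, in A's order
def pvSubsA (str1 : String) : List String :=
  (PySem.List.pyRange 0 (PySem.Str.len str1) 1).flatMap (fun i =>
    (PySem.List.pyRange (i + 1) (PySem.Str.len str1 + 1) 1).map (fun j =>
      PySem.Str.slice str1 (some i) (some j)))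

-- the substrings of a fixed length L that B's row for L visits
def pvRow (str1 : String) (L : Int) : List String :=
  (PySem.List.pyRange 0 (PySem.Str.len str1 - L + 1) 1).map (fun i =>
    PySem.Str.slice str1 (some i) (some (i + L)))

-- running maximum of lengths
def pvM (l : List String) : Int := l.foldl (fun acc x => max acc (PySem.Str.len x)) 0

lemma pvLoopK_eq (str2 sub doubled : String) (ks : List Int) (st : Int × String) :
    pvLoopK str2 sub doubled ks st =
      if ks.any (fun k =>
          PySem.Str.isIn (PySem.Str.slice doubled (some k) (some (k + PySem.Str.len sub))) str2) then
        pvUpd sub st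
      else st := by
  induction ks with
  | nil => simp [pvLoopK]
  | cons k rest ih =>
    show (if PySem.Str.isIn (PySem.Str.slice doubled (some k) (some (k + PySem.Str.len sub))) str2 then _ else _) = _
    simp only [List.any_cons]
    rcases Bool.eq_false_or_eq_true (PySem.Str.isIn (PySem.Str.slice doubled (some k) (some (k + PySem.Str.len sub))) str2) with h | h <;> simp only [h, Bool.false_or, Bool.true_or]
    · simp [pvUpd]
    · rw [if_neg (by simp), ih]

lemma equivalent_eq_fold (str1 str2 : String) :
    equivalent str1 str2 =
      (((pvSubsA str1).filter (pvP str2)).foldl (fun st sub => pvUpd sub st) ((0 : Int), "")).2 := by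
  unfold equivalent pvSubsA
  rw [List.foldl_filter, List.foldl_flatMap]
  show (List.foldl _ ((0:Int), "") _).2 = (List.foldl _ ((0:Int), "") _).2
  have hfun : (fun (st : Int × String) (i : Int) =>
      (PySem.List.pyRange (i + 1) (PySem.Str.len str1 + 1) 1).foldl (fun st j =>
        pvLoopK str2 (PySem.Str.slice str1 (some i) (some j))
          (String.ofList (PySem.List.pyRepeat (PySem.Str.slice str1 (some i) (some j)).toList 2))
          (PySem.List.pyRange 0 (PySem.Str.len (PySem.Str.slice str1 (some i) (some j))) 1) st) st)
      = (fun (acc : Int × String) (x : Int) =>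
      List.foldl (fun x y => if pvP str2 y = true then pvUpd y x else x) acc
        (List.map (fun j => PySem.Str.slice str1 (some x) (some j))
          (PySem.List.pyRange (x + 1) (PySem.Str.len str1 + 1) 1))) := by
    funext st i
    rw [List.foldl_map]
    have h2 : (fun (st : Int × String) (j : Int) =>
        pvLoopK str2 (PySem.Str.slice str1 (some i) (some j))
          (String.ofList (PySem.List.pyRepeat (PySem.Str.slice str1 (some i) (some j)).toList 2))
          (PySem.List.pyRange 0 (PySem.Str.len (PySem.Str.slice str1 (some i) (some j))) 1) st)
        = (fun (x : Int × String) (y : Int) =>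
        if pvP str2 (PySem.Str.slice str1 (some i) (some y)) = true then
          pvUpd (PySem.Str.slice str1 (some i) (some y)) x else x) := by
      funext st j
      rw [pvLoopK_eq]
      rfl
    rw [h2]
  rw [hfun]

lemma pvMinStr_go (l : List String) (b : String) :
    l.foldl (fun best sub =>
      match best with
      | none => some sub
      | some b => if sub < b then some sub else best) (some b) = some (l.foldl min b) := by
  induction l generalizing b with
  | nil => rfl
  | cons x xs ih =>
    simp only [List.foldl_cons]
    rcases lt_or_ge x b with h | h
    · rw [if_pos h, ih, min_eq_right h.le]
    · rw [if_neg (not_lt.mpr h), ih, min_eq_left h]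

lemma pvMinStr_eq_none (l : List String) : pvMinStr l = none ↔ l = [] := by
  cases l with
  | nil => simp [pvMinStr]
  | cons x xs =>
    rw [pvMinStr, List.foldl_cons]
    show (xs.foldl _ (some x) = none) ↔ _
    rw [pvMinStr_go]
    simp

lemma foldl_min_mem (xs : List String) (x : String) : xs.foldl min x ∈ x :: xs := by
  induction xs generalizing x with
  | nil => simp
  | cons y ys ih =>
    simp only [List.foldl_cons]
    rcases List.mem_cons.mp (ih (min x y)) with h | h
    · rcases min_choice x y with hm | hm
      · simp [h.trans hm]
      · simp [h.trans hm]
    · simp [h]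
  
lemma foldl_min_le (xs : List String) (x : String) : ∀ b ∈ x :: xs, xs.foldl min x ≤ b := by
  induction xs generalizing x with
  | nil => simp
  | cons y ys ih =>
    intro b hb
    simp only [List.foldl_cons]
    rcases List.mem_cons.mp hb with rfl | hb
    · exact le_trans (ih (min b y) (min b y) (by simp)) (min_le_left b y)
    · rcases List.mem_cons.mp hb with rfl | hb
      · exact le_trans (ih (min x b) (min x b) (by simp)) (min_le_right x b)
      · exact ih (min x y) b (by simp [hb])

lemma pvMinStr_spec (l : List String) (a : String) :
    pvMinStr l = some a ↔ (a ∈ l ∧ ∀ b ∈ l, a ≤ b) := by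
  cases l with
  | nil => simp [pvMinStr]
  | cons x xs =>
    rw [pvMinStr, List.foldl_cons]
    show (xs.foldl _ (some x) = some a) ↔ _
    rw [pvMinStr_go]
    constructor
    · rintro ⟨rfl⟩
      exact ⟨foldl_min_mem xs x, foldl_min_le xs x⟩
    · rintro ⟨ha, hle⟩
      have h1 := foldl_min_le xs x a ha
      have h2 := hle _ (foldl_min_mem xs x)
      exact congrArg some (le_antisymm h1 h2)
lemma pvM_append (l : List String) (x : String) :
    pvM (l ++ [x]) = max (pvM l) (PySem.Str.len x) := by
  simp [pvM, List.foldl_append]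

lemma pvM_le_of_mem (l : List String) (x : String) (hx : x ∈ l) : PySem.Str.len x ≤ pvM l :=
  (PySem.List.le_foldl_max_int l (fun x => PySem.Str.len x) 0).2 x hx

lemma pvM_attained (l : List String) (h : 0 < pvM l) : ∃ y ∈ l, PySem.Str.len y = pvM l := by
  induction l using List.reverseRecOn with
  | nil => simp [pvM] at h
  | append_singleton l x ih =>
    rw [pvM_append] at h ⊢
    rcases lt_or_ge (PySem.Str.len x) (pvM l) with hc | hc
    · rw [max_eq_left hc.le] at h ⊢
      obtain ⟨y, hy, hlen⟩ := ih h
      exact ⟨y, by simp [hy], hlen⟩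
    · exact ⟨x, by simp, (max_eq_right hc).symm⟩

lemma foldUpd_spec (l : List String) (hl : ∀ x ∈ l, 1 ≤ PySem.Str.len x) :
    l.foldl (fun st sub => pvUpd sub st) ((0 : Int), "") =
      (pvM l,
        match pvMinStr (l.filter (fun x => PySem.Str.len x == pvM l)) with
        | some b => b
        | none => "") := by
  induction l using List.reverseRecOn with
  | nil => simp [pvM, pvMinStr]
  | append_singleton l x ih =>
    have hx : 1 ≤ PySem.Str.len x := hl x (by simp)
    have hl' : ∀ y ∈ l, 1 ≤ PySem.Str.len y := fun y hy => hl y (by simp [hy])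
    rw [List.foldl_append, List.foldl_cons, List.foldl_nil, ih hl', pvM_append]
    rcases lt_trichotomy (pvM l) (PySem.Str.len x) with h | h | h
    · -- x strictly longer than everything before
      rw [max_eq_right h.le]
      have hfilter : (l ++ [x]).filter (fun y => PySem.Str.len y == PySem.Str.len x) = [x] := by
        rw [List.filter_append]
        have : l.filter (fun y => PySem.Str.len y == PySem.Str.len x) = [] := by
          rw [List.filter_eq_nil_iff]
          intro y hy hc
          rw [beq_iff_eq] at hc
          have := pvM_le_of_mem l y hy
          rw [hc] at this
          exact absurd h (not_lt.mpr this)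
        rw [this, List.nil_append, List.filter_singleton,
          show (PySem.Str.len x == PySem.Str.len x) = true from beq_iff_eq.mpr rfl]
        rfl
      rw [hfilter]
      have : pvMinStr [x] = some x := by simp [pvMinStr]
      rw [this]
      show pvUpd x _ = _
      rw [pvUpd, if_pos h]
    · -- same length as the current maximum
      have h0 : 0 < pvM l := by omega
      rw [show max (pvM l) (PySem.Str.len x) = pvM l from by rw [h, max_self]]
      obtain ⟨y, hy, hylen⟩ := pvM_attained l h0
      have hfne : l.filter (fun z => PySem.Str.len z == pvM l) ≠ [] := by
        intro hnil
        rw [List.filter_eq_nil_iff] at hnil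
        exact hnil y hy (beq_iff_eq.mpr hylen)
      obtain ⟨r, hr⟩ : ∃ r, pvMinStr (l.filter (fun z => PySem.Str.len z == pvM l)) = some r := by
        cases hmr : pvMinStr (l.filter (fun z => PySem.Str.len z == pvM l)) with
        | none => exact absurd ((pvMinStr_eq_none _).mp hmr) hfne
        | some r => exact ⟨r, rfl⟩
      obtain ⟨hrmem, hrle⟩ := (pvMinStr_spec _ _).mp hr
      have hfx : (l ++ [x]).filter (fun z => PySem.Str.len z == pvM l) =
          l.filter (fun z => PySem.Str.len z == pvM l) ++ [x] := by
        rw [List.filter_append, List.filter_singleton,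
          show (PySem.Str.len x == pvM l) = true from beq_iff_eq.mpr h.symm]
        rfl
      rw [hfx, hr]
      have hmin : pvMinStr (l.filter (fun z => PySem.Str.len z == pvM l) ++ [x]) =
          some (if x < r then x else r) := by
        rw [pvMinStr_spec]
        constructor
        · rcases lt_or_ge x r with hxr | hxr
          · simp [hxr]
          · rw [if_neg (not_lt.mpr hxr)]
            exact List.mem_append_left _ hrmem
        · intro b hb
          rcases List.mem_append.mp hb with hb | hb
          · rcases lt_or_ge x r with hxr | hxr
            · rw [if_pos hxr]; exact le_trans hxr.le (hrle b hb)
            · rw [if_neg (not_lt.mpr hxr)]; exact hrle b hb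
          · simp only [List.mem_singleton] at hb
            subst hb
            rcases lt_or_ge b r with hxr | hxr
            · simp [hxr]
            · rw [if_neg (not_lt.mpr hxr)]; exact hxr
      rw [hmin]
      show pvUpd x (pvM l, r) = _
      rw [pvUpd]
      rw [if_neg (by rw [← h]; exact lt_irrefl _)]
      by_cases hxr : x < r
      · rw [if_pos ⟨h.symm, hxr⟩, if_pos hxr]
      · rw [if_neg (by rintro ⟨-, hc⟩; exact hxr hc), if_neg hxr]
    · -- x shorter: nothing changes
      rw [max_eq_left h.le]
      have hfx : (l ++ [x]).filter (fun z => PySem.Str.len z == pvM l) =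
          l.filter (fun z => PySem.Str.len z == pvM l) := by
        rw [List.filter_append]
        have hfalse : (PySem.Str.len x == pvM l) = false := by
          simpa using h.ne
        rw [List.filter_singleton, hfalse]
        simp
      rw [hfx]
      show pvUpd x _ = _
      rw [pvUpd, if_neg (not_lt.mpr h.le), if_neg (by rintro ⟨h1, -⟩; exact h.ne h1)]
lemma pvP_pos_len (str2 sub : String) (h : pvP str2 sub = true) : 1 ≤ PySem.Str.len sub := by
  rw [pvP, List.any_eq_true] at h
  obtain ⟨k, hk, -⟩ := h
  have := PySem.List.mem_pyRange_one.mp hk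
  omega

lemma slice_toList (s : String) (i L : Int) (hi : 0 ≤ i) (hL : 0 ≤ L)
    (hb : i + L ≤ PySem.Str.len s) :
    (PySem.Str.slice s (some i) (some (i + L))).toList = (s.toList.drop i.toNat).take L.toNat := by
  rw [PySem.Str.toList_slice, PySem.Chars.slice_eq_listSlice, PySem.List.slice_toNat _ hi (by omega)]
  congr 1
  omega

lemma slice_len (s : String) (i L : Int) (hi : 0 ≤ i) (hL : 0 ≤ L)
    (hb : i + L ≤ PySem.Str.len s) :
    PySem.Str.len (PySem.Str.slice s (some i) (some (i + L))) = L := by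
  rw [PySem.Str.len_eq, slice_toList s i L hi hL hb, List.length_take, List.length_drop]
  rw [PySem.Str.len_eq] at hb
  omega

lemma infix_iff_window (t s : List Char) (L : Nat) (ht : t.length = L) :
    t <:+: s ↔ ∃ i : Nat, i + L ≤ s.length ∧ t = (s.drop i).take L := by
  constructor
  · rintro ⟨p, q, hpq⟩
    refine ⟨p.length, ?_, ?_⟩
    · have : (p ++ t ++ q).length = s.length := by rw [hpq]
      simp at this
      omega
    · rw [← hpq, List.append_assoc, List.drop_left, ← ht, List.take_left]
  · rintro ⟨i, hle, ht'⟩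
    rw [ht']
    exact (List.take_prefix L (s.drop i)).isInfix.trans (List.drop_suffix i s).isInfix

lemma contains_windows (str2 x : String) (L : Int) (hL : 1 ≤ L)
    (hx : PySem.Str.len x = L) :
    PySem.Set.contains
      (PySem.Set.ofList ((PySem.List.pyRange 0 (PySem.Str.len str2 - L + 1) 1).map
        (fun i => PySem.Str.slice str2 (some i) (some (i + L)))))
      x = PySem.Str.isIn x str2 := by
  rw [Bool.eq_iff_iff]
  simp only [PySem.Set.contains_eq_listContains, List.contains_eq_mem, PySem.Set.mem_ofList,
    decide_eq_true_eq, List.mem_map, PySem.Str.isIn_iff_infix]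
  have hxlen : x.toList.length = L.toNat := by
    rw [PySem.Str.len_eq] at hx
    omega
  rw [infix_iff_window x.toList str2.toList L.toNat hxlen]
  have hm : PySem.Str.len str2 = (str2.toList.length : Int) := PySem.Str.len_eq str2
  constructor
  · rintro ⟨i, hi, heq⟩
    obtain ⟨hi0, hi1⟩ := PySem.List.mem_pyRange_one.mp hi
    refine ⟨i.toNat, by omega, ?_⟩
    rw [← heq, slice_toList str2 i L hi0 (by omega) (by omega)]
  · rintro ⟨i, hle, ht⟩
    refine ⟨(i : Int), PySem.List.mem_pyRange_one.mpr ⟨by omega, by omega⟩, ?_⟩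
    apply String.toList_inj.mp
    rw [slice_toList str2 (i : Int) L (by omega) (by omega) (by omega), ht]
    congr 1

lemma pvBestRow_eq (str1 str2 : String) (L : Int) (hL : 1 ≤ L) :
    pvBestRow str1 str2 L = pvMinStr ((pvRow str1 L).filter (pvP str2)) := by
  unfold pvBestRow pvRow pvMinStr
  rw [List.foldl_filter, List.foldl_map]
  apply PySem.List.foldl_congr_mem
  intro acc i hi
  obtain ⟨hi0, hi1⟩ := PySem.List.mem_pyRange_one.mp hi
  have hn : 0 ≤ PySem.Str.len str1 := by
    rw [PySem.Str.len_eq]; positivity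
  have hbnd : i + L ≤ PySem.Str.len str1 := by omega
  have hsublen : PySem.Str.len (PySem.Str.slice str1 (some i) (some (i + L))) = L :=
    slice_len str1 i L hi0 (by omega) hbnd
  have hcond : ((PySem.List.pyRange 0 L 1).any (fun k =>
      PySem.Set.contains
        (PySem.Set.ofList ((PySem.List.pyRange 0 (PySem.Str.len str2 - L + 1) 1).map
          (fun i => PySem.Str.slice str2 (some i) (some (i + L)))))
        (PySem.Str.slice
          (String.ofList ((PySem.Str.slice str1 (some i) (some (i + L))).toList ++
            (PySem.Str.slice str1 (some i) (some (i + L))).toList))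
          (some k) (some (k + L))))) =
      pvP str2 (PySem.Str.slice str1 (some i) (some (i + L))) := by
    rw [pvP, hsublen]
    have hrep : PySem.List.pyRepeat (PySem.Str.slice str1 (some i) (some (i + L))).toList 2 =
        (PySem.Str.slice str1 (some i) (some (i + L))).toList ++
        (PySem.Str.slice str1 (some i) (some (i + L))).toList := by
      simp [PySem.List.pyRepeat]
    rw [hrep]
    apply PySem.List.any_congr_mem
    intro k hk
    obtain ⟨hk0, hk1⟩ := PySem.List.mem_pyRange_one.mp hk
    apply contains_windows
    · exact hL
    · have hdlen : PySem.Str.len (String.ofList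
          ((PySem.Str.slice str1 (some i) (some (i + L))).toList ++
           (PySem.Str.slice str1 (some i) (some (i + L))).toList)) = 2 * L := by
        rw [PySem.Str.len_eq, String.toList_ofList, List.length_append]
        rw [PySem.Str.len_eq] at hsublen
        omega
      exact slice_len _ k L hk0 (by omega) (by omega)
  simp only [hcond]

lemma mem_row_iff (str1 : String) (L : Int) (hL : 1 ≤ L) (sub : String) :
    sub ∈ pvRow str1 L ↔
      ∃ i : Int, 0 ≤ i ∧ i + L ≤ PySem.Str.len str1 ∧
        sub = PySem.Str.slice str1 (some i) (some (i + L)) := by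
  rw [pvRow, List.mem_map]
  constructor
  · rintro ⟨i, hi, heq⟩
    obtain ⟨hi0, hi1⟩ := PySem.List.mem_pyRange_one.mp hi
    exact ⟨i, hi0, by omega, heq.symm⟩
  · rintro ⟨i, hi0, hi1, heq⟩
    exact ⟨i, PySem.List.mem_pyRange_one.mpr ⟨hi0, by omega⟩, heq.symm⟩

lemma mem_subsA_iff (str1 : String) (sub : String) :
    sub ∈ pvSubsA str1 ↔
      ∃ i j : Int, 0 ≤ i ∧ i < j ∧ j ≤ PySem.Str.len str1 ∧
        sub = PySem.Str.slice str1 (some i) (some j) := by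
  rw [pvSubsA, List.mem_flatMap]
  constructor
  · rintro ⟨i, hi, hmem⟩
    obtain ⟨hi0, hi1⟩ := PySem.List.mem_pyRange_one.mp hi
    obtain ⟨j, hj, heq⟩ := List.mem_map.mp hmem
    obtain ⟨hj0, hj1⟩ := PySem.List.mem_pyRange_one.mp hj
    exact ⟨i, j, hi0, by omega, by omega, heq.symm⟩
  · rintro ⟨i, j, hi0, hij, hjn, heq⟩
    refine ⟨i, PySem.List.mem_pyRange_one.mpr ⟨hi0, by omega⟩, List.mem_map.mpr
      ⟨j, PySem.List.mem_pyRange_one.mpr ⟨by omega, by omega⟩, heq.symm⟩⟩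

-- membership transfer between A's substring list and B's row of a given length
lemma mem_subsA_iff_row (str1 : String) (sub : String) (L : Int) (hL : 1 ≤ L)
    (hlen : PySem.Str.len sub = L) :
    sub ∈ pvSubsA str1 ↔ (L ≤ PySem.Str.len str1 ∧ sub ∈ pvRow str1 L) := by
  rw [mem_subsA_iff, mem_row_iff str1 L hL]
  constructor
  · rintro ⟨i, j, hi0, hij, hjn, heq⟩
    have hj : j = i + (j - i) := by omega
    rw [hj] at heq
    have := slice_len str1 i (j - i) hi0 (by omega) (by omega)
    rw [← heq] at this
    have hLji : L = j - i := by omega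
    refine ⟨by omega, i, hi0, by omega, ?_⟩
    rw [heq, hLji]
  · rintro ⟨hLn, i, hi0, hin, heq⟩
    exact ⟨i, i + L, hi0, by omega, by omega, heq⟩

lemma pvAltLoop_skip (str1 str2 : String) (a b : Int) (hb : 0 ≤ b) (hab : b ≤ a)
    (h : ∀ L : Int, b < L → L ≤ a → pvBestRow str1 str2 L = none) :
    pvAltLoop str1 str2 (PySem.List.pyRange a 0 (-1)) =
      pvAltLoop str1 str2 (PySem.List.pyRange b 0 (-1)) := by
  obtain ⟨d, hd⟩ : ∃ d : Nat, a - b = (d : Int) := ⟨(a - b).toNat, by omega⟩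
  induction d generalizing a with
  | zero =>
    have : a = b := by omega
    rw [this]
  | succ d ih =>
    have hba : b < a := by omega
    rw [PySem.List.pyRange_neg_one_cons (by omega : (0 : Int) < a)]
    show (match pvBestRow str1 str2 a with
      | some b => b
      | none => pvAltLoop str1 str2 (PySem.List.pyRange (a - 1) 0 (-1))) = _
    rw [h a hba le_rfl]
    exact ih (a - 1) (by omega) (fun L hbL hLa => h L hbL (by omega)) (by omega)

-- ===== VERDICT (by name: the statement is the Claim_ definition above) =====
theorem equivalent_spec : Claim_equal_equivalent := by
  intro str1 str2 _
  unfold Spec_equivalent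
  rw [equivalent_eq_fold]
  set FA := (pvSubsA str1).filter (pvP str2) with hFAdef
  have hlen1 : ∀ x ∈ FA, 1 ≤ PySem.Str.len x := fun x hx => pvP_pos_len str2 x (List.of_mem_filter hx)
  rw [foldUpd_spec FA hlen1]
  have hn0 : 0 ≤ PySem.Str.len str1 := by rw [PySem.Str.len_eq]; positivity
  unfold equivalent_alt
  have hrow_empty : ∀ L : Int, 1 ≤ L → (∀ x ∈ FA, PySem.Str.len x < L) →
      (pvRow str1 L).filter (pvP str2) = [] := by
    intro L hL hbound
    rw [List.filter_eq_nil_iff]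
    intro x hx hpx
    obtain ⟨i, hi0, hin, heq⟩ := (mem_row_iff str1 L hL x).mp hx
    have hlenx : PySem.Str.len x = L := by rw [heq]; exact slice_len str1 i L hi0 (by omega) hin
    have hxFA : x ∈ FA := List.mem_filter.mpr
      ⟨(mem_subsA_iff_row str1 x L hL hlenx).mpr ⟨by omega, hx⟩, hpx⟩
    have := hbound x hxFA
    omega
  by_cases hFAnil : FA = []
  · rw [hFAnil]
    have hall : ∀ L : Int, 0 < L → L ≤ PySem.Str.len str1 → pvBestRow str1 str2 L = none := by
      intro L hL hLn
      rw [pvBestRow_eq str1 str2 L hL, pvMinStr_eq_none]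
      exact hrow_empty L hL (by rw [hFAnil]; intro x hx; cases hx)
    rw [pvAltLoop_skip str1 str2 (PySem.Str.len str1) 0 le_rfl hn0 (fun L h1 h2 => hall L h1 h2)]
    rw [PySem.List.pyRange_neg_one_eq_nil le_rfl]
    simp [pvM, pvMinStr, pvAltLoop]
  · obtain ⟨y0, hy0⟩ := List.exists_mem_of_ne_nil FA hFAnil
    have hM0 : 0 < pvM FA := by
      have h1 := hlen1 y0 hy0
      have h2 := pvM_le_of_mem FA y0 hy0
      omega
    obtain ⟨y, hyFA, hylen⟩ := pvM_attained FA hM0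
    have hyP : pvP str2 y = true := List.of_mem_filter hyFA
    have hysubs : y ∈ pvSubsA str1 := List.mem_of_mem_filter hyFA
    have hM1 : (1 : Int) ≤ pvM FA := by have := hlen1 y hyFA; omega
    have hMn := (mem_subsA_iff_row str1 y (pvM FA) hM1 hylen).mp hysubs
    have hskip := pvAltLoop_skip str1 str2 (PySem.Str.len str1) (pvM FA) (by omega) hMn.1
      (fun L h1 h2 => by
        rw [pvBestRow_eq str1 str2 L (by omega), pvMinStr_eq_none]
        exact hrow_empty L (by omega) (fun x hx => by have := pvM_le_of_mem FA x hx; omega))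
    rw [hskip]
    rw [PySem.List.pyRange_neg_one_cons (by omega : (0 : Int) < pvM FA)]
    show _ = (match pvBestRow str1 str2 (pvM FA) with
      | some b => b
      | none => pvAltLoop str1 str2 (PySem.List.pyRange (pvM FA - 1) 0 (-1)))
    rw [pvBestRow_eq str1 str2 (pvM FA) hM1]
    have hmemiff : ∀ x, x ∈ FA.filter (fun z => PySem.Str.len z == pvM FA) ↔
        x ∈ (pvRow str1 (pvM FA)).filter (pvP str2) := by
      intro x
      rw [List.mem_filter, List.mem_filter, List.mem_filter]
      constructor
      · rintro ⟨⟨hxs, hxp⟩, hxlen⟩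
        rw [beq_iff_eq] at hxlen
        exact ⟨((mem_subsA_iff_row str1 x (pvM FA) hM1 hxlen).mp hxs).2, hxp⟩
      · rintro ⟨hxr, hxp⟩
        obtain ⟨i, hi0, hin, heq⟩ := (mem_row_iff str1 (pvM FA) hM1 x).mp hxr
        have hxlen : PySem.Str.len x = pvM FA := by
          rw [heq]; exact slice_len str1 i (pvM FA) hi0 (by omega) hin
        exact ⟨⟨(mem_subsA_iff_row str1 x (pvM FA) hM1 hxlen).mpr ⟨hMn.1, hxr⟩, hxp⟩,
          beq_iff_eq.mpr hxlen⟩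
    have hymem : y ∈ (pvRow str1 (pvM FA)).filter (pvP str2) := List.mem_filter.mpr ⟨hMn.2, hyP⟩
    obtain ⟨r, hr⟩ : ∃ r, pvMinStr ((pvRow str1 (pvM FA)).filter (pvP str2)) = some r := by
      cases hmr : pvMinStr ((pvRow str1 (pvM FA)).filter (pvP str2)) with
      | none =>
        exact absurd ((pvMinStr_eq_none _).mp hmr)
          (by intro hnil; rw [hnil] at hymem; cases hymem)
      | some r => exact ⟨r, rfl⟩
    obtain ⟨hrmem, hrle⟩ := (pvMinStr_spec _ _).mp hr
    have hlhs : pvMinStr (FA.filter (fun z => PySem.Str.len z == pvM FA)) = some r := by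
      rw [pvMinStr_spec]
      exact ⟨(hmemiff r).mpr hrmem, fun b hb => hrle b ((hmemiff b).mp hb)⟩
    rw [hr, hlhs]
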